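-- pv_equiv track=rewrite | github.com/k-roy/COMPASS | COMPASS_compare_splice_junctions_from_multiple_aligner_SAM.py | get_gene_id_from_gff_annotation
-- ===== SOURCE A (Python) =====
-- def get_gene_id_from_gff_annotation(string):
--     '''
--     input: annotation field in gff format
--     output: gene_id
--     '''
--     if 'ID=' not in string:
--         return None
--     dist = len('ID=')
--     ID_found = False
--     for idx in range(len(string)):
--         if string[idx:idx+dist] == 'ID=':
--             ID_found = True
--             id_start = idx+dist
--             break
--     if not ID_found:
--         return None
--     id_end = None
--     for idx in range(id_start, len(string)):
--         if string[idx] == ';':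
--             id_end = idx
--             break
--     if id_end == None:
--         return None
--     return string[id_start:id_end]
-- ===== SOURCE B (Python) =====
-- def get_gene_id_from_gff_annotation(string):
--     '''
--     input: annotation field in gff format
--     output: gene_id
--     '''
--     # Split the annotation into ';'-delimited fields; the id must be terminated
--     # by a ';', so only fields before the last separator can carry it.  The
--     # first field containing 'ID=' holds the gene id: everything after the
--     # marker (partition) up to the ';' that ended the field.
--     fields = string.split(';')
--     for field in fields[:-1]:
--         _, sep, tail = field.partition('ID=')
--         if sep:
--             return tail
--     return None
-- ===== Notes on version B (the rewrite author's own statement) =====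
-- stated objective: idiomatic
-- what changed: Replaces A's character-index scanning (membership test, a slice-comparison loop to locate 'ID=', then a char loop for the terminating ';') with a field decomposition: split the annotation on ';' and return the partition tail of the first non-final field containing 'ID='.
import Mathlib
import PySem

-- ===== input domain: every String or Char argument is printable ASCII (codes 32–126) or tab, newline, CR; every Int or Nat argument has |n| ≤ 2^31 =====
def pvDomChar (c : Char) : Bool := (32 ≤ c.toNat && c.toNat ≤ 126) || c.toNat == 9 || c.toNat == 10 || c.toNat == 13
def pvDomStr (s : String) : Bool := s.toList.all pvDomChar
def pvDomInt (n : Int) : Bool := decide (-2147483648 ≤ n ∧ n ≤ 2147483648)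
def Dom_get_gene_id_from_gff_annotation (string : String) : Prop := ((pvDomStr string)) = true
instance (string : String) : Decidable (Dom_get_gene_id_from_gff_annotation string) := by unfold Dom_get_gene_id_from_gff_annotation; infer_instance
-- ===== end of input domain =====

-- B replaces A's index-scanning loops by the field decomposition idiomatic for GFF attributes:
-- split on ';' and partition the first field carrying 'ID=' (return value only; no side effects).

-- ===== PORT A =====
-- first loop: for idx in range(len(string)): if string[idx:idx+3] == 'ID=': id_start = idx+3; break
def pvA_loop1 (s : String) : List Int → Option Int
  | [] => none
  | idx :: rest =>
    if PySem.Str.slice s (some idx) (some (idx + 3)) = "ID=" then some (idx + 3)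
    else pvA_loop1 s rest

-- second loop: for idx in range(id_start, len(string)): if string[idx] == ';': id_end = idx; break
def pvA_loop2 (s : String) : List Int → Option Int
  | [] => none
  | idx :: rest =>
    if PySem.Str.pyGet? s idx = some ';' then some idx
    else pvA_loop2 s rest

def get_gene_id_from_gff_annotation (string : String) : Option String :=
  if PySem.Str.isIn "ID=" string = false then none
  else
    match pvA_loop1 string (PySem.List.pyRange 0 (PySem.Str.len string) 1) with
    | none => none  -- 'if not ID_found: return None'
    | some id_start =>
      match pvA_loop2 string (PySem.List.pyRange id_start (PySem.Str.len string) 1) with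
      | none => none  -- 'if id_end == None: return None'
      | some id_end => some (PySem.Str.slice string (some id_start) (some id_end))

-- ===== PORT B =====
-- field.partition('ID='): the piece after the first 'ID=' occurrence, or none when 'ID=' is absent
-- (hand port of str.partition, which PySem does not provide; exact: scans for the first occurrence)
def pvPartTail : List Char → Option (List Char)
  | [] => none
  | c :: rest =>
    if ['I', 'D', '='] <+: (c :: rest) then some ((c :: rest).drop 3) else pvPartTail rest

-- the for-loop over the fields: first field whose partition found 'ID=' yields its tail
def pvBLoop : List (List Char) → Option (List Char)
  | [] => none
  | p :: ps =>
    match pvPartTail p with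
    | some t => some t
    | none => pvBLoop ps

def get_gene_id_from_gff_annotation_alt (string : String) : Option String :=
  -- fields = string.split(';') is PySem.Chars.splitOn (sep ≠ ''); fields[:-1] is the slice
  (pvBLoop (PySem.List.slice (PySem.Chars.splitOn string.toList [';']) none (some (-1)))).map
    String.ofList

-- ===== PRECONDITION & SPEC =====
def Spec_get_gene_id_from_gff_annotation (string : String) (out : Option String) : Prop := out = get_gene_id_from_gff_annotation_alt string
instance (string : String) (out : Option String) : Decidable (Spec_get_gene_id_from_gff_annotation string out) := by unfold Spec_get_gene_id_from_gff_annotation; infer_instance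

-- ===== CLAIM (what is proved, stated in full; the proofs are below) =====
def Claim_equal_get_gene_id_from_gff_annotation : Prop := ∀ (string : String), Dom_get_gene_id_from_gff_annotation string → Spec_get_gene_id_from_gff_annotation string (get_gene_id_from_gff_annotation string)

-- ===== LEMMAS AND PROOFS =====

-- index of the first occurrence of 'ID=' (as an offset), structurally
def pvIdx1 : List Char → Option Nat
  | [] => none
  | c :: rest =>
    if ['I', 'D', '='] <+: (c :: rest) then some 0 else (pvIdx1 rest).map (· + 1)

-- index of the first ';', structurally
def pvIdx2 : List Char → Option Nat
  | [] => none
  | c :: rest => if c = ';' then some 0 else (pvIdx2 rest).map (· + 1)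

-- the common reference value both ports are reduced to
def pvTarget (cs : List Char) : Option (List Char) :=
  match pvIdx1 cs with
  | none => none
  | some k => (pvIdx2 (cs.drop (k + 3))).map (fun m => (cs.drop (k + 3)).take m)

-- structural characterisation of splitOn on the one-char separator ';'
def pvSplit : List Char → List (List Char)
  | [] => [[]]
  | c :: rest =>
    if c = ';' then [] :: pvSplit rest
    else (c :: (pvSplit rest).headI) :: (pvSplit rest).tail

lemma pvSplit_ne_nil (cs : List Char) : pvSplit cs ≠ [] := by
  cases cs with
  | nil => simp [pvSplit]
  | cons c rest => unfold pvSplit; split <;> simp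

lemma pvSplit_headI (cs : List Char) : (pvSplit cs).headI = cs.takeWhile (· ≠ ';') := by
  induction cs with
  | nil => simp [pvSplit]
  | cons c rest ih =>
    unfold pvSplit
    by_cases hc : c = ';'
    · simp [hc]
    · simp [hc, ih]

lemma pvSplit_tail_nil_iff (cs : List Char) : (pvSplit cs).tail = [] ↔ ';' ∉ cs := by
  induction cs with
  | nil => simp [pvSplit]
  | cons c rest ih =>
    unfold pvSplit
    by_cases hc : c = ';'
    · simp [hc, pvSplit_ne_nil]
    · simp [hc, ih]
      exact fun _ h => hc h.symm

lemma pv_go_eq (fuel : Nat) : ∀ (l cur : List Char) (acc : List (List Char)),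
    l.length ≤ fuel →
    PySem.Chars.splitOn.go [';'] fuel l cur acc =
      acc.reverse ++ (pvSplit l).modifyHead (cur.reverse ++ ·) := by
  induction fuel with
  | zero =>
    intro l cur acc hl
    have : l = [] := by cases l <;> simp_all
    subst this
    rw [show PySem.Chars.splitOn.go [';'] 0 [] cur acc
          = ((cur.reverse ++ []) :: acc).reverse from rfl]
    simp [pvSplit]
  | succ fuel ih =>
    intro l cur acc hl
    cases l with
    | nil =>
      rw [show PySem.Chars.splitOn.go [';'] (fuel + 1) [] cur acc
            = (cur.reverse :: acc).reverse from rfl]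
      simp [pvSplit]
    | cons c rest =>
      rw [show PySem.Chars.splitOn.go [';'] (fuel + 1) (c :: rest) cur acc
            = (if ([';'] : List Char).isPrefixOf (c :: rest) = true then
                 PySem.Chars.splitOn.go [';'] fuel (List.drop 1 (c :: rest)) [] (cur.reverse :: acc)
               else PySem.Chars.splitOn.go [';'] fuel rest (c :: cur) acc) from rfl]
      by_cases hc : c = ';'
      · subst hc
        rw [if_pos (by simp [List.isPrefixOf])]
        rw [show List.drop 1 (';' :: rest) = rest from rfl]
        rw [ih rest [] (cur.reverse :: acc) (by simp at hl; omega)]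
        simp [pvSplit, List.reverse_cons]
        cases pvSplit rest <;> simp
      · rw [if_neg (by simp [List.isPrefixOf]; exact fun h => hc h.symm)]
        rw [ih rest (c :: cur) acc (by simp at hl; omega)]
        obtain ⟨h, t, he⟩ := List.exists_cons_of_ne_nil (pvSplit_ne_nil rest)
        simp [pvSplit, hc, he, List.reverse_cons]

lemma pv_splitOn_semi (cs : List Char) : PySem.Chars.splitOn cs [';'] = pvSplit cs := by
  show PySem.Chars.splitOn.go [';'] (cs.length + 1) cs [] [] = pvSplit cs
  rw [pv_go_eq (cs.length + 1) cs [] [] (by omega)]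
  obtain ⟨h, t, he⟩ := List.exists_cons_of_ne_nil (pvSplit_ne_nil cs)
  simp [he]

-- pvIdx2 packaged as 'first ;-free chunk'
lemma pv_idx2_none_iff (l : List Char) : pvIdx2 l = none ↔ ';' ∉ l := by
  induction l with
  | nil => simp [pvIdx2]
  | cons c rest ih =>
    unfold pvIdx2
    by_cases hc : c = ';'
    · simp [hc]
    · simp [hc, ih]
      exact fun _ h => hc h.symm

lemma pv_idx2_map_take (l : List Char) :
    (pvIdx2 l).map (fun m => l.take m) =
      if ';' ∈ l then some (l.takeWhile (· ≠ ';')) else none := by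
  induction l with
  | nil => simp [pvIdx2]
  | cons c rest ih =>
    unfold pvIdx2
    by_cases hc : c = ';'
    · simp [hc]
    · rw [if_neg hc]
      cases h2 : pvIdx2 rest with
      | none =>
        have : ';' ∉ rest := (pv_idx2_none_iff rest).mp h2
        simp [Ne.symm hc, this]
      | some m =>
        have hm : ';' ∈ rest := by
          by_contra hno
          rw [(pv_idx2_none_iff rest).mpr hno] at h2; cases h2
        rw [h2] at ih
        simp only [hm, if_pos, Option.map_some] at ih
        simp [hc, Ne.symm hc, hm, Option.some.injEq] at ih ⊢
        exact ih

-- pvTarget recursion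
lemma pv_target_nil : pvTarget [] = none := rfl

lemma pv_target_cons_of_not_prefix (c : Char) (rest : List Char)
    (h : ¬ ['I', 'D', '='] <+: (c :: rest)) :
    pvTarget (c :: rest) = pvTarget rest := by
  unfold pvTarget
  rw [pvIdx1, if_neg h]
  cases h1 : pvIdx1 rest with
  | none => simp
  | some k => simp [List.drop_succ_cons]

lemma pv_target_cons_of_prefix (c : Char) (rest : List Char)
    (h : ['I', 'D', '='] <+: (c :: rest)) :
    pvTarget (c :: rest) =
      (pvIdx2 ((c :: rest).drop 3)).map (fun m => ((c :: rest).drop 3).take m) := by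
  unfold pvTarget
  rw [pvIdx1, if_pos h]

-- ===== B = pvTarget =====
lemma pv_B_eq_target (cs : List Char) :
    pvBLoop ((pvSplit cs).dropLast) = pvTarget cs := by
  induction cs with
  | nil => simp [pvSplit, pvBLoop, pv_target_nil]
  | cons c rest ih =>
    by_cases hc : c = ';'
    · subst hc
      have hnp : ¬ ['I', 'D', '='] <+: (';' :: rest) := by
        intro h; obtain ⟨t, ht⟩ := h; cases ht
      have hs : pvSplit (';' :: rest) = [] :: pvSplit rest := by
        simp [pvSplit]
      rw [pv_target_cons_of_not_prefix _ _ hnp, ← ih, hs,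
        List.dropLast_cons_of_ne_nil (pvSplit_ne_nil rest)]
      simp [pvBLoop, pvPartTail]
    · obtain ⟨h, t, he⟩ := List.exists_cons_of_ne_nil (pvSplit_ne_nil rest)
      have hh : h = rest.takeWhile (· ≠ ';') := by
        have := pvSplit_headI rest; rw [he] at this; simpa using this
      cases t with
      | nil =>
        -- no ';' in rest (nor in c :: rest): both sides are none
        have hno : ';' ∉ rest := by
          rw [← pvSplit_tail_nil_iff, he]; rfl
        have hnoc : ';' ∉ (c :: rest) := by
          simp [hno]
          exact fun h => hc h.symm
        have hB : pvBLoop ((pvSplit (c :: rest)).dropLast) = none := by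
          unfold pvSplit
          rw [if_neg hc, he]
          simp [pvBLoop]
        rw [hB]
        by_cases hp : ['I', 'D', '='] <+: (c :: rest)
        · rw [pv_target_cons_of_prefix _ _ hp]
          have : ';' ∉ (c :: rest).drop 3 := fun hm => hnoc (List.mem_of_mem_drop hm)
          rw [(pv_idx2_none_iff _).mpr this]; rfl
        · rw [pv_target_cons_of_not_prefix _ _ hp, ← ih]
          rw [he]; simp [pvBLoop]
      | cons t0 ts =>
        -- rest contains a ';' : the split of c :: rest is (c :: h) :: t0 :: ts
        have hsplit : pvSplit (c :: rest) = (c :: h) :: t0 :: ts := by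
          unfold pvSplit; rw [if_neg hc, he]; rfl
        have hdrop : (pvSplit (c :: rest)).dropLast = (c :: h) :: (t0 :: ts).dropLast := by
          rw [hsplit, List.dropLast_cons_of_ne_nil (by simp)]
        have hBrest : pvBLoop ((pvSplit rest).dropLast) =
            match pvPartTail h with
            | some u => some u
            | none => pvBLoop ((t0 :: ts).dropLast) := by
          rw [he, List.dropLast_cons_of_ne_nil (by simp)]; rfl
        by_cases hp : ['I', 'D', '='] <+: (c :: rest)
        · -- c = 'I', rest = 'D' :: '=' :: r with ';' ∈ r
          obtain ⟨r, hr⟩ := hp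
          have hcI : c = 'I' := by cases hr; rfl
          have hrest : rest = 'D' :: '=' :: r := by cases hr; rfl
          subst hcI
          have hsemir : ';' ∈ r := by
            have : ';' ∈ rest := by
              by_contra hno
              rw [← pvSplit_tail_nil_iff] at hno
              rw [he] at hno; cases hno
            rw [hrest] at this
            simpa using this
          have hhval : h = 'D' :: '=' :: r.takeWhile (· ≠ ';') := by
            rw [hh, hrest]; simp
          have hpart : pvPartTail ('I' :: h) = some (r.takeWhile (· ≠ ';')) := by
            rw [hhval]
            rw [pvPartTail, if_pos ⟨r.takeWhile (· ≠ ';'), rfl⟩]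
            rfl
          rw [hdrop]
          rw [pvBLoop, hpart]
          rw [pv_target_cons_of_prefix _ _ ⟨r, hr⟩]
          have hd3 : ('I' :: rest).drop 3 = r := by rw [hrest]; rfl
          rw [hd3, pv_idx2_map_take, if_pos hsemir]
        · -- no match in c :: h either; step both sides to rest
          have hnp2 : ¬ ['I', 'D', '='] <+: (c :: h) := by
            intro hpre
            refine hp (hpre.trans ?_)
            rw [hh]
            exact List.cons_prefix_cons.mpr ⟨rfl, List.takeWhile_prefix _⟩
          rw [hdrop, pvBLoop]
          rw [pvPartTail, if_neg hnp2]
          rw [pv_target_cons_of_not_prefix _ _ hp, ← ih, hBrest]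
  
-- ===== A's loops = pvIdx1 / pvIdx2 =====

-- a length-3 slice of the string equals "ID=" iff ['I','D','='] is a prefix of the chars dropped at that index
lemma pv_slice_match (s : String) (k : Nat) :
    (PySem.Str.slice s (some (k : Int)) (some ((k : Int) + 3)) = "ID=") ↔
      ['I', 'D', '='] <+: s.toList.drop k := by
  rw [← String.toList_inj, PySem.Str.toList_slice, PySem.Chars.slice_eq_listSlice]
  have h3 : ((k : Int) + 3) = ((k + 3 : Nat) : Int) := by push_cast; ring
  rw [h3, PySem.List.slice_natCast, Nat.add_sub_cancel_left]
  rw [List.prefix_iff_eq_take]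
  constructor
  · intro h; exact h.symm
  · intro h; exact h.symm

lemma pv_loop1_eq (s : String) :
    ∀ (n a : Nat), s.toList.length ≤ a + n →
      pvA_loop1 s (PySem.List.pyRange (a : Int) (s.toList.length : Int) 1) =
        (pvIdx1 (s.toList.drop a)).map (fun k => ((a + k + 3 : Nat) : Int)) := by
  intro n
  induction n with
  | zero =>
    intro a hlen
    rw [PySem.List.pyRange_one_eq_nil (by exact_mod_cast (by omega : s.toList.length ≤ a))]
    rw [List.drop_eq_nil_of_le (by omega)]
    rfl
  | succ n ih =>
    intro a hlen
    rcases Nat.lt_or_ge a s.toList.length with ha | ha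
    · rw [PySem.List.pyRange_one_cons (by exact_mod_cast ha)]
      rw [List.drop_eq_getElem_cons ha]
      by_cases hm : ['I', 'D', '='] <+: s.toList.drop a
      · rw [List.drop_eq_getElem_cons ha] at hm
        rw [pvA_loop1, if_pos (by
          rw [pv_slice_match]
          rw [List.drop_eq_getElem_cons ha]
          exact hm)]
        rw [pvIdx1, if_pos hm]
        simp only [Option.map_some]
        exact congrArg some (by push_cast; ring)
      · rw [List.drop_eq_getElem_cons ha] at hm
        rw [pvA_loop1, if_neg (by
          rw [pv_slice_match]
          rw [List.drop_eq_getElem_cons ha]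
          exact hm)]
        rw [pvIdx1, if_neg hm]
        have hcast : ((a : Int) + 1) = ((a + 1 : Nat) : Int) := by push_cast; ring
        rw [hcast, ih (a + 1) (by omega)]
        rw [Option.map_map]
        congr 1
        funext k
        simp only [Function.comp]
        push_cast
        ring
    · rw [PySem.List.pyRange_one_eq_nil (by exact_mod_cast ha)]
      rw [List.drop_eq_nil_of_le (by omega)]
      rfl

lemma pv_loop2_eq (s : String) :
    ∀ (n a : Nat), s.toList.length ≤ a + n →
      pvA_loop2 s (PySem.List.pyRange (a : Int) (s.toList.length : Int) 1) =
        (pvIdx2 (s.toList.drop a)).map (fun m => ((a + m : Nat) : Int)) := by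
  intro n
  induction n with
  | zero =>
    intro a hlen
    rw [PySem.List.pyRange_one_eq_nil (by exact_mod_cast (by omega : s.toList.length ≤ a))]
    rw [List.drop_eq_nil_of_le (by omega)]
    rfl
  | succ n ih =>
    intro a hlen
    rcases Nat.lt_or_ge a s.toList.length with ha | ha
    · rw [PySem.List.pyRange_one_cons (by exact_mod_cast ha)]
      rw [List.drop_eq_getElem_cons ha]
      rw [pvA_loop2, PySem.Str.pyGet?_natCast]
      rw [pvIdx2]
      by_cases hm : s.toList[a] = ';'
      · rw [if_pos (by rw [List.getElem?_eq_getElem ha, hm]), if_pos hm]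
        simp
      · rw [if_neg (by rw [List.getElem?_eq_getElem ha]; simpa using hm), if_neg hm]
        have hcast : ((a : Int) + 1) = ((a + 1 : Nat) : Int) := by push_cast; ring
        rw [hcast, ih (a + 1) (by omega)]
        rw [Option.map_map]
        congr 1
        funext m
        simp only [Function.comp]
        push_cast
        ring
    · rw [PySem.List.pyRange_one_eq_nil (by exact_mod_cast ha)]
      rw [List.drop_eq_nil_of_le (by omega)]
      rfl

lemma pv_idx1_none_iff (cs : List Char) :
    pvIdx1 cs = none ↔ ¬ ['I', 'D', '='] <:+: cs := by
  induction cs with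
  | nil =>
    simp [pvIdx1, List.infix_nil]
  | cons c rest ih =>
    unfold pvIdx1
    by_cases hp : ['I', 'D', '='] <+: (c :: rest)
    · simp [hp, List.infix_cons_iff]
    · simp [hp, ih, List.infix_cons_iff]

lemma pv_idx1_some_prefix : ∀ (cs : List Char) (k : Nat), pvIdx1 cs = some k →
    ['I', 'D', '='] <+: cs.drop k := by
  intro cs
  induction cs with
  | nil => intro k hk; cases hk
  | cons c rest ih =>
    intro k hk
    rw [pvIdx1] at hk
    by_cases hp : ['I', 'D', '='] <+: (c :: rest)
    · rw [if_pos hp] at hk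
      injection hk with h
      subst h
      simpa using hp
    · rw [if_neg hp] at hk
      cases h0 : pvIdx1 rest with
      | none => rw [h0] at hk; cases hk
      | some k' =>
        rw [h0] at hk
        simp at hk
        subst hk
        simpa [List.drop_succ_cons] using ih k' h0

-- ===== VERDICT helper: A = pvTarget (as strings) =====
lemma pv_A_eq_target (s : String) :
    get_gene_id_from_gff_annotation s = (pvTarget s.toList).map String.ofList := by
  unfold get_gene_id_from_gff_annotation
  rw [PySem.Str.isIn_eq, PySem.Str.len_eq]
  have htl : ("ID=" : String).toList = ['I', 'D', '='] := rfl
  rw [htl]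
  by_cases hin : PySem.Chars.isIn ['I', 'D', '='] s.toList = true
  · rw [if_neg (by simp [hin])]
    have h1 : pvIdx1 s.toList ≠ none := by
      intro h
      exact (pv_idx1_none_iff _).mp h ((PySem.Chars.isIn_iff_infix _ _).mp hin)
    obtain ⟨k, hk⟩ := Option.ne_none_iff_exists'.mp h1
    have hz : (0 : Int) = ((0 : Nat) : Int) := rfl
    rw [hz, pv_loop1_eq s s.toList.length 0 (by omega)]
    rw [List.drop_zero, hk]
    simp only [Option.map_some]
    have hk3 : ((0 + k + 3 : Nat) : Int) = (((k + 3 : Nat)) : Int) := by push_cast; ring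
    rw [hk3]
    -- bound: the match is inside the string
    have hkb : k + 3 ≤ s.toList.length := by
      have hpre := pv_idx1_some_prefix s.toList k hk
      have hlen := hpre.length_le
      rw [List.length_drop] at hlen
      simp only [List.length_cons, List.length_nil] at hlen
      omega
    rw [pv_loop2_eq s s.toList.length (k + 3) (by omega)]
    unfold pvTarget
    rw [hk]
    cases h2 : pvIdx2 (s.toList.drop (k + 3)) with
    | none => simp [h2]
    | some m =>
      simp only [h2, Option.map_some]
      congr 1
      rw [← String.toList_inj, String.toList_ofList]
      rw [PySem.Str.toList_slice, PySem.Chars.slice_eq_listSlice]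
      rw [show ((k + 3 + m : Nat) : Int) = ((k + 3 : Nat) : Int) + ((m : Nat) : Int) by push_cast; ring]
      rw [PySem.List.slice_natCast_add]
  · rw [if_pos (by simpa using hin)]
    have h1 : pvIdx1 s.toList = none := by
      rw [pv_idx1_none_iff]
      intro hinf
      exact hin ((PySem.Chars.isIn_iff_infix _ _).mpr hinf)
    unfold pvTarget
    rw [h1]
    rfl

-- ===== VERDICT (by name: the statement is the Claim_ definition above) =====
theorem get_gene_id_from_gff_annotation_spec : Claim_equal_get_gene_id_from_gff_annotation := by
  intro s _
  unfold Spec_get_gene_id_from_gff_annotation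
  rw [pv_A_eq_target]
  unfold get_gene_id_from_gff_annotation_alt
  rw [pv_splitOn_semi, PySem.List.slice_to_neg_one, pv_B_eq_target]
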